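-- pv_equiv track=rewrite | github.com/Nish05/Data-Analysis-Algorithms-on-Structured-Data | Otsu's Classification/Otsu_Classification.py | search_misses
-- ===== SOURCE A (Python) =====
-- def search_misses(thresh,sorted_flex,sorted_classes):
--     misses=0
--     fa=0
--     count=0
--     hit=0
--     cr=0
--     for iter in range(0,len(sorted_flex)):
--         if((sorted_classes[iter]==2 and sorted_flex[iter]<thresh)):
--             misses+=1
--
--         if((sorted_classes[iter]!=2 and sorted_flex[iter]>=thresh)):
--                 if(sorted_classes[iter]==1):
--                     count+=1
--                 fa+=1
--         if((sorted_classes[iter]!=2 and sorted_flex[iter]<thresh)):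
--                 cr+=1
--         if((sorted_classes[iter]==2 and sorted_flex[iter]>=thresh)):
--             hit+=1
--
--     return misses,fa,count,cr,hit
-- ===== SOURCE B (Python) =====
-- def search_misses(thresh, sorted_flex, sorted_classes):
--     pairs = list(zip(sorted_flex, sorted_classes))
--     below = [c for f, c in pairs if f < thresh]
--     above = [c for f, c in pairs if f >= thresh]
--     misses = below.count(2)
--     cr = len(below) - misses
--     hit = above.count(2)
--     fa = len(above) - hit
--     count = above.count(1)
--     return misses, fa, count, cr, hit
-- ===== Notes on version B (the rewrite author's own statement) =====
-- stated objective: simpler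
-- what changed: Replaced the index loop with four per-element condition tests by a split of the zipped (flex,class) pairs into below/at-or-above threshold groups and plain count/length arithmetic on the class lists.
import Mathlib
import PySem

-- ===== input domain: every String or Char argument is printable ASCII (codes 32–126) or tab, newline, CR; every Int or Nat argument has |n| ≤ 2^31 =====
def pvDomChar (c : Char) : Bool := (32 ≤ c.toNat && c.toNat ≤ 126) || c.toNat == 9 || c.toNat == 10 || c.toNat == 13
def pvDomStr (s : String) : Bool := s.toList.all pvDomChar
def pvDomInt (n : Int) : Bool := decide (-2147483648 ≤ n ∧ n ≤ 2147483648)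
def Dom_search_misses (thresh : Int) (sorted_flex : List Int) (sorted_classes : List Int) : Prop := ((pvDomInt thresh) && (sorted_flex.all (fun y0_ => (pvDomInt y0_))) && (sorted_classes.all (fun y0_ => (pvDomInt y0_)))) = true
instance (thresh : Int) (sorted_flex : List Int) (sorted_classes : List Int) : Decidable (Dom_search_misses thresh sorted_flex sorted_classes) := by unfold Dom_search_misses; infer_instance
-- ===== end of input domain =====

-- B replaces A's four-condition index loop by splitting the zipped pairs at the
-- threshold and counting on the two groups (objective: simpler).

-- ===== PORT A =====
-- state s = (misses, fa, count, cr, hit), exactly A's five counters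
def search_misses (thresh : Int) (sorted_flex : List Int) (sorted_classes : List Int) : Int × Int × Int × Int × Int :=
  (PySem.List.pyRange 0 sorted_flex.length 1).foldl
    (fun s i =>
      let c := PySem.List.pyGetD sorted_classes i 0
      let f := PySem.List.pyGetD sorted_flex i 0
      let misses := if c = 2 ∧ f < thresh then s.1 + 1 else s.1
      let count := if (c ≠ 2 ∧ thresh ≤ f) ∧ c = 1 then s.2.2.1 + 1 else s.2.2.1
      let fa := if c ≠ 2 ∧ thresh ≤ f then s.2.1 + 1 else s.2.1
      let cr := if c ≠ 2 ∧ f < thresh then s.2.2.2.1 + 1 else s.2.2.2.1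
      let hit := if c = 2 ∧ thresh ≤ f then s.2.2.2.2 + 1 else s.2.2.2.2
      (misses, fa, count, cr, hit))
    (0, 0, 0, 0, 0)

-- ===== PORT B =====
def search_misses_alt (thresh : Int) (sorted_flex : List Int) (sorted_classes : List Int) : Int × Int × Int × Int × Int :=
  let pairs := sorted_flex.zip sorted_classes
  let below := (pairs.filter (fun p => decide (p.1 < thresh))).map Prod.snd
  let above := (pairs.filter (fun p => decide (thresh ≤ p.1))).map Prod.snd
  let misses : Int := below.count 2
  let cr : Int := (below.length : Int) - misses
  let hit : Int := above.count 2
  let fa : Int := (above.length : Int) - hit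
  let count : Int := above.count 1
  (misses, fa, count, cr, hit)

-- ===== PRECONDITION & SPEC =====
-- Pre_ excludes exactly the inputs where A raises IndexError (classes shorter than flex).
def Pre_search_misses (thresh : Int) (sorted_flex : List Int) (sorted_classes : List Int) : Prop :=
  sorted_flex.length ≤ sorted_classes.length
instance (thresh : Int) (sorted_flex : List Int) (sorted_classes : List Int) : Decidable (Pre_search_misses thresh sorted_flex sorted_classes) := by unfold Pre_search_misses; infer_instance
def pvWitness_search_misses : Int × List Int × List Int := (1, [0, 2], [2, 1])

def Spec_search_misses (thresh : Int) (sorted_flex : List Int) (sorted_classes : List Int) (out : Int × Int × Int × Int × Int) : Prop := out = search_misses_alt thresh sorted_flex sorted_classes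
instance (thresh : Int) (sorted_flex : List Int) (sorted_classes : List Int) (out : Int × Int × Int × Int × Int) : Decidable (Spec_search_misses thresh sorted_flex sorted_classes out) := by unfold Spec_search_misses; infer_instance

-- ===== CLAIM (what is proved, stated in full; the proofs are below) =====
def Claim_equal_search_misses : Prop := ∀ (thresh : Int) (sorted_flex : List Int) (sorted_classes : List Int), Dom_search_misses thresh sorted_flex sorted_classes → Pre_search_misses thresh sorted_flex sorted_classes → Spec_search_misses thresh sorted_flex sorted_classes (search_misses thresh sorted_flex sorted_classes)

-- ===== LEMMAS AND PROOFS =====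

-- the loop body of A seen as a function of the current (flex, class) pair
def pvStep (thresh : Int) (s : Int × Int × Int × Int × Int) (p : Int × Int) : Int × Int × Int × Int × Int :=
  let c := p.2
  let f := p.1
  let misses := if c = 2 ∧ f < thresh then s.1 + 1 else s.1
  let count := if (c ≠ 2 ∧ thresh ≤ f) ∧ c = 1 then s.2.2.1 + 1 else s.2.2.1
  let fa := if c ≠ 2 ∧ thresh ≤ f then s.2.1 + 1 else s.2.1
  let cr := if c ≠ 2 ∧ f < thresh then s.2.2.2.1 + 1 else s.2.2.2.1
  let hit := if c = 2 ∧ thresh ≤ f then s.2.2.2.2 + 1 else s.2.2.2.2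
  (misses, fa, count, cr, hit)

theorem pvA_eq_zipfold (thresh : Int) (fs cs : List Int) (h : fs.length ≤ cs.length) :
    search_misses thresh fs cs = (fs.zip cs).foldl (pvStep thresh) (0, 0, 0, 0, 0) := by
  unfold search_misses
  have hlen : (fs.zip cs).length = fs.length := by
    simp [List.length_zip]; omega
  have hcongr :
      (PySem.List.pyRange 0 fs.length 1).foldl
        (fun s i =>
          let c := PySem.List.pyGetD cs i 0
          let f := PySem.List.pyGetD fs i 0
          let misses := if c = 2 ∧ f < thresh then s.1 + 1 else s.1
          let count := if (c ≠ 2 ∧ thresh ≤ f) ∧ c = 1 then s.2.2.1 + 1 else s.2.2.1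
          let fa := if c ≠ 2 ∧ thresh ≤ f then s.2.1 + 1 else s.2.1
          let cr := if c ≠ 2 ∧ f < thresh then s.2.2.2.1 + 1 else s.2.2.2.1
          let hit := if c = 2 ∧ thresh ≤ f then s.2.2.2.2 + 1 else s.2.2.2.2
          (misses, fa, count, cr, hit))
        (0, 0, 0, 0, 0)
      = (PySem.List.pyRange 0 ((fs.zip cs).length : Int) 1).foldl
          (fun s i => pvStep thresh s (PySem.List.pyGetD (fs.zip cs) i (0, 0))) (0, 0, 0, 0, 0) := by
    rw [hlen]
    refine PySem.List.foldl_congr_mem _ _ _ _ ?_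
    intro s i hi
    have hmem := PySem.List.mem_pyRange_one.mp hi
    have h0 : (0 : Int) ≤ i := hmem.1
    have h1 : i < fs.length := hmem.2
    have hzf : PySem.List.pyGetD fs i 0 = fs[i.toNat]'(by omega) :=
      PySem.List.pyGetD_eq_getElem fs 0 h0 (by exact_mod_cast h1)
    have hzc : PySem.List.pyGetD cs i 0 = cs[i.toNat]'(by omega) :=
      PySem.List.pyGetD_eq_getElem cs 0 h0 (by omega)
    have hzz : PySem.List.pyGetD (fs.zip cs) i (0, 0)
        = (fs.zip cs)[i.toNat]'(by omega) :=
      PySem.List.pyGetD_eq_getElem (fs.zip cs) ((0,0) : Int × Int) h0 (by omega)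
    simp only [pvStep, hzf, hzc, hzz, List.getElem_zip]
  rw [hcongr, PySem.List.foldl_pyRange_zero_pyGetD']

theorem pvZipfold (thresh : Int) (l : List (Int × Int)) (m fa co cr hi : Int) :
    l.foldl (pvStep thresh) (m, fa, co, cr, hi) =
      (m + (l.countP (fun p => decide (p.2 = 2 ∧ p.1 < thresh)) : Int),
       fa + (l.countP (fun p => decide (p.2 ≠ 2 ∧ thresh ≤ p.1)) : Int),
       co + (l.countP (fun p => decide ((p.2 ≠ 2 ∧ thresh ≤ p.1) ∧ p.2 = 1)) : Int),
       cr + (l.countP (fun p => decide (p.2 ≠ 2 ∧ p.1 < thresh)) : Int),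
       hi + (l.countP (fun p => decide (p.2 = 2 ∧ thresh ≤ p.1)) : Int)) := by
  induction l generalizing m fa co cr hi with
  | nil => simp
  | cons p t ih =>
    rw [List.foldl_cons]
    show List.foldl (pvStep thresh) (pvStep thresh (m, fa, co, cr, hi) p) t = _
    simp only [pvStep]
    rw [ih]
    simp only [List.countP_cons]
    rcases lt_or_ge p.1 thresh with hf | hf
    · have hnle : ¬ thresh ≤ p.1 := not_le.mpr hf
      by_cases h2 : p.2 = 2 <;> by_cases h1 : p.2 = 1 <;>
        simp_all <;> split_ifs <;> omega
    · have hnlt : ¬ p.1 < thresh := not_lt.mpr hf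
      by_cases h2 : p.2 = 2 <;> by_cases h1 : p.2 = 1 <;>
        simp_all <;> split_ifs <;> omega

theorem pvCountMapFilter (v : Int) (q : Int × Int → Bool) (l : List (Int × Int)) :
    ((l.filter q).map Prod.snd).count v = l.countP (fun p => q p && (p.2 == v)) := by
  induction l with
  | nil => simp
  | cons p t ih =>
    rw [List.filter_cons, List.countP_cons]
    by_cases hq : q p <;> simp [hq, List.count_cons, ih]

theorem pvCountSub (q r : Int × Int → Bool) (l : List (Int × Int)) :
    (l.countP q : Int) - l.countP (fun p => q p && r p) = l.countP (fun p => q p && ! r p) := by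
  induction l with
  | nil => simp
  | cons p t ih =>
    simp only [List.countP_cons]
    cases hq : q p <;> cases hr : r p <;> simp [hq, hr] <;> omega

-- ===== VERDICT (by name: the statement is the Claim_ definition above) =====
theorem search_misses_spec : Claim_equal_search_misses := by
  intro thresh fs cs _ hpre
  unfold Spec_search_misses
  rw [pvA_eq_zipfold thresh fs cs hpre, pvZipfold]
  simp only [search_misses_alt, pvCountMapFilter, List.length_map, ← List.countP_eq_length_filter]
  rw [pvCountSub (fun p => decide (p.1 < thresh)) (fun p => p.2 == 2) (fs.zip cs),
      pvCountSub (fun p => decide (thresh ≤ p.1)) (fun p => p.2 == 2) (fs.zip cs)]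
  refine Prod.ext ?_ (Prod.ext ?_ (Prod.ext ?_ (Prod.ext ?_ ?_))) <;>
    simp only [zero_add] <;> norm_cast <;>
    apply List.countP_congr <;> intro p _ <;>
    simp [Bool.and_comm, Bool.and_left_comm] <;> omega
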